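-- pv_equiv track=rewrite | github.com/Rifa-Tasfiya/CSE721-Project | ciphers/playfair.py | insert_filler_x
-- ===== SOURCE A (Python) =====
-- def insert_filler_x(text):
--     i = 0
--     result = ""
--
--     while i < len(text):
--         result += text[i]
--
--         if i + 1 < len(text) and text[i] == text[i+1]:
--             result += 'x'
--             i += 1
--         else:
--             if i + 1 < len(text):
--                 result += text[i+1]
--                 i += 2
--             else:
--                 i += 1
--
--     return result
-- ===== SOURCE B (Python) =====
-- def insert_filler_x(text):
--     out = []
--     pending = None
--     for ch in text:
--         if pending is None:
--             out.append(ch)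
--             pending = ch
--         elif ch == pending:
--             out.append('x')
--             out.append(ch)
--             pending = ch
--         else:
--             out.append(ch)
--             pending = None
--     return ''.join(out)
-- ===== Notes on version B (the rewrite author's own statement) =====
-- stated objective: faster
-- what changed: Replaced the index-jumping while loop (i advancing by 1 or 2 with lookahead text[i+1]) building the result by repeated string +=, by a single for-each pass over the characters maintaining a pending pair-start state, collecting pieces in a list joined once at the end.
import Mathlib
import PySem

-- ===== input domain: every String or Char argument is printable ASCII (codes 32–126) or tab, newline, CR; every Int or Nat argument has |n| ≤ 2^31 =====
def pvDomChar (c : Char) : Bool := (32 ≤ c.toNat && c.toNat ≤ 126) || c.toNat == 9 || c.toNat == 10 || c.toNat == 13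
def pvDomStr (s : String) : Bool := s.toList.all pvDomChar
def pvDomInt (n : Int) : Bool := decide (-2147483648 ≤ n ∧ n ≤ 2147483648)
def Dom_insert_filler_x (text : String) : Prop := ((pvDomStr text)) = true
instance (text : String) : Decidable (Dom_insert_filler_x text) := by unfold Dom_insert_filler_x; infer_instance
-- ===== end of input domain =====

-- B replaces A's index-jumping while loop by a single for-each pass with a pending pair-start state (alternative decomposition, same result).

-- ===== PORT A =====
-- literal port of A's while loop: state (i, result), i advances by 1 or 2
-- (Python's short-circuit 'i+1 < len and text[i] == text[i+1]' is the nested if)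
def pvLoopA (s : List Char) (i : Nat) (res : List Char) : List Char :=
  if h : i < s.length then
    let res1 := res ++ [s[i]]
    if h1 : i + 1 < s.length then
      if s[i] = s[i + 1] then
        pvLoopA s (i + 1) (res1 ++ ['x'])
      else
        pvLoopA s (i + 2) (res1 ++ [s[i + 1]])
    else
      pvLoopA s (i + 1) res1
  else res
termination_by s.length - i
decreasing_by all_goals omega

def insert_filler_x (text : String) : String :=
  String.mk (pvLoopA text.toList 0 [])

-- ===== PORT B =====
-- one step of B's for-each pass: state (output so far, pending pair-start)
def pvStepB (st : List Char × Option Char) (ch : Char) : List Char × Option Char :=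
  match st.2 with
  | none => (st.1 ++ [ch], some ch)
  | some p => if ch = p then (st.1 ++ ['x', ch], some ch) else (st.1 ++ [ch], none)

def insert_filler_x_alt (text : String) : String :=
  String.mk (text.toList.foldl pvStepB ([], none)).1

-- ===== PRECONDITION & SPEC =====
def Spec_insert_filler_x (text : String) (out : String) : Prop := out = insert_filler_x_alt text
instance (text : String) (out : String) : Decidable (Spec_insert_filler_x text out) := by unfold Spec_insert_filler_x; infer_instance

-- ===== CLAIM (what is proved, stated in full; the proofs are below) =====
def Claim_equal_insert_filler_x : Prop := ∀ (text : String), Dom_insert_filler_x text → Spec_insert_filler_x text (insert_filler_x text)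

-- ===== LEMMAS AND PROOFS =====

-- common reference function: process digraphs, a duplicate starts the next pair
def pvPairs : List Char → List Char
  | [] => []
  | [c] => [c]
  | c1 :: c2 :: t =>
    if c1 = c2 then c1 :: 'x' :: pvPairs (c2 :: t)
    else c1 :: c2 :: pvPairs t

theorem pvLoopA_eq (s : List Char) (i : Nat) (res : List Char) :
    pvLoopA s i res = res ++ pvPairs (s.drop i) := by
  by_cases h : i < s.length
  · have hd : s.drop i = s[i] :: s.drop (i + 1) := List.drop_eq_getElem_cons h
    by_cases h1 : i + 1 < s.length
    · have hd1 : s.drop (i + 1) = s[i + 1] :: s.drop (i + 2) := List.drop_eq_getElem_cons h1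
      by_cases he : s[i] = s[i + 1]
      · have ih := pvLoopA_eq s (i + 1) ((res ++ [s[i]]) ++ ['x'])
        rw [pvLoopA]
        simp only [dif_pos h, dif_pos h1, if_pos he, ih, hd, hd1, pvPairs, if_pos he]
        simp [← hd1]
      · have ih := pvLoopA_eq s (i + 2) ((res ++ [s[i]]) ++ [s[i + 1]])
        rw [pvLoopA]
        simp only [dif_pos h, dif_pos h1, if_neg he, ih, hd, hd1, pvPairs, if_neg he]
        simp
    · have ih := pvLoopA_eq s (i + 1) (res ++ [s[i]])
      have hd1 : s.drop (i + 1) = [] := List.drop_of_length_le (by omega)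
      rw [pvLoopA]
      simp only [dif_pos h, dif_neg h1, ih, hd, hd1, pvPairs]
      simp
  · have hd : s.drop i = [] := List.drop_of_length_le (by omega)
    rw [pvLoopA]
    simp [h, hd, pvPairs]
termination_by s.length - i
decreasing_by all_goals omega

theorem pvFoldB_eq (l : List Char) (acc : List Char) :
    (l.foldl pvStepB (acc, none)).1 = acc ++ pvPairs l := by
  match l with
  | [] => simp [pvPairs]
  | [c] => simp [pvStepB, pvPairs]
  | c1 :: c2 :: t =>
    by_cases he : c1 = c2
    · have ih := pvFoldB_eq (c2 :: t) (acc ++ [c1, 'x'])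
      simp only [List.foldl, pvStepB, he.symm, if_pos] at ih ⊢
      simp only [List.append_assoc] at ih ⊢
      simpa [pvPairs, he] using ih
    · have ih := pvFoldB_eq t (acc ++ [c1, c2])
      have he' : ¬ c2 = c1 := fun hh => he hh.symm
      simp only [List.foldl, pvStepB, if_neg he'] at ih ⊢
      simpa [pvPairs, he] using ih
termination_by l.length
decreasing_by all_goals simp

-- ===== VERDICT (by name: the statement is the Claim_ definition above) =====
theorem insert_filler_x_spec : Claim_equal_insert_filler_x := by
  intro text _
  unfold Spec_insert_filler_x insert_filler_x insert_filler_x_alt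
  rw [pvLoopA_eq, pvFoldB_eq]
  simp
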